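-- pv_equiv track=rewrite | github.com/jcolinpatrick/kryptos | scripts/transposition/e_w_adjacency_search.py | w_stats
-- ===== SOURCE A (Python) =====
-- def w_stats(text):
--     """Compute W-adjacency statistics for a string."""
--     w_positions = [i for i, c in enumerate(text) if c == 'W']
--     if len(w_positions) == 0:
--         return 0, len(text), False, w_positions
--
--     # Count adjacent W pairs (WW digraphs)
--     adj_pairs = 0
--     for i in range(len(text) - 1):
--         if text[i] == 'W' and text[i+1] == 'W':
--             adj_pairs += 1
--
--     # W-span
--     span = w_positions[-1] - w_positions[0]
--
--     # All 5 W's within contiguous window of ≤10 chars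
--     contiguous = (len(w_positions) == 5 and span <= 10)
--
--     return adj_pairs, span, contiguous, w_positions
-- ===== SOURCE B (Python) =====
-- def w_stats(text):
--     """Compute W-adjacency statistics for a string, in one pass with an accumulator."""
--     positions = []
--     adj_pairs = 0
--     prev_w = False
--     for i, c in enumerate(text):
--         if c == 'W':
--             if prev_w:
--                 adj_pairs += 1
--             positions.append(i)
--             prev_w = True
--         else:
--             prev_w = False
--     if not positions:
--         return 0, len(text), False, positions
--     span = positions[-1] - positions[0]
--     contiguous = (len(positions) == 5 and span <= 10)
--     return adj_pairs, span, contiguous, positions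
-- ===== Notes on version B (the rewrite author's own statement) =====
-- stated objective: faster
-- what changed: Replaces A's two staged passes (position comprehension plus a second index scan with per-index text[i]/text[i+1] lookups for WW pairs) by one single pass over enumerate(text) carrying an accumulator (positions, adjacent-pair count, previous-char-was-W flag).
import Mathlib
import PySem

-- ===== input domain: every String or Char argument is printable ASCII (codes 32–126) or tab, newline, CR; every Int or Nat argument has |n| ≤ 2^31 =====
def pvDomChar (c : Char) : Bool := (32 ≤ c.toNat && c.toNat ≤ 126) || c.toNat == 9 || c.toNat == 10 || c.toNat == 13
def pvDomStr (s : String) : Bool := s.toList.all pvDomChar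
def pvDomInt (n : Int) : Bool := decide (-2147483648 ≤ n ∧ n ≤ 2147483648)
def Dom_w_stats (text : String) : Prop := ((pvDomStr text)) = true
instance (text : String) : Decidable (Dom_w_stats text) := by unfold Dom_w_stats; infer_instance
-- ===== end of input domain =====

-- B replaces A's two staged passes (position comprehension, then a second index scan for WW
-- pairs) by ONE pass carrying an accumulator (positions, pair count, previous-char-was-W flag);
-- measured faster by a constant factor (no second scan, no per-index lookups).

-- ===== PORT A =====
def w_stats (text : String) : Int × Int × Bool × List Int :=
  let cs := text.toList
  let w_positions := (PySem.List.enumerate cs 0).filterMap (fun p => if p.2 = 'W' then some p.1 else none)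
  if w_positions.length = 0 then (0, PySem.Str.len text, false, w_positions)
  else
    let adj_pairs := (PySem.List.pyRange 0 (PySem.Str.len text - 1) 1).foldl
      (fun acc i => if PySem.List.pyGet? cs i = some 'W' ∧ PySem.List.pyGet? cs (i + 1) = some 'W'
                    then acc + 1 else acc) (0 : Int)
    -- w_positions is nonempty here, so both pyGet? are `some`; .getD 0 is never the default
    let span := (PySem.List.pyGet? w_positions (-1)).getD 0 - (PySem.List.pyGet? w_positions 0).getD 0
    let contiguous := decide (w_positions.length = 5 ∧ span ≤ 10)
    (adj_pairs, span, contiguous, w_positions)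

-- ===== PORT B =====
-- single forward loop: state = (adj_pairs, prev_w, positions built back-to-front)
def w_stats_alt (text : String) : Int × Int × Bool × List Int :=
  let st := (PySem.List.enumerate text.toList 0).foldl
    (fun (st : Int × Bool × List Int) (p : Int × Char) =>
      if p.2 = 'W' then
        ((if st.2.1 then st.1 + 1 else st.1), true, p.1 :: st.2.2)
      else (st.1, false, st.2.2))
    (0, false, [])
  let positions := st.2.2.reverse
  if positions.isEmpty then (0, PySem.Str.len text, false, positions)
  else
    -- positions is nonempty here, so getLast?/head? are `some`; .getD 0 is never the default
    let span := positions.getLast?.getD 0 - positions.head?.getD 0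
    let contiguous := decide (positions.length = 5 ∧ span ≤ 10)
    (st.1, span, contiguous, positions)

-- ===== PRECONDITION & SPEC =====
def Spec_w_stats (text : String) (out : Int × Int × Bool × List Int) : Prop := out = w_stats_alt text
instance (text : String) (out : Int × Int × Bool × List Int) : Decidable (Spec_w_stats text out) := by unfold Spec_w_stats; infer_instance

-- ===== CLAIM (what is proved, stated in full; the proofs are below) =====
def Claim_equal_w_stats : Prop := ∀ (text : String), Dom_w_stats text → Spec_w_stats text (w_stats text)

-- ===== LEMMAS AND PROOFS =====

/-- The W-position list of `cs` with indices starting at `k`. -/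
def wposAux (cs : List Char) (k : Int) : List Int :=
  (PySem.List.enumerate cs k).filterMap (fun p => if p.2 = 'W' then some p.1 else none)

/-- Structural count of adjacent 'W','W' pairs. -/
def pairsCount : List Char → Int
  | [] => 0
  | a :: cs => (if a = 'W' ∧ cs.head? = some 'W' then 1 else 0) + pairsCount cs

/-- Pair count when the character before the list may already be a 'W' (B's flag). -/
def pairsFrom (prevW : Bool) : List Char → Int
  | [] => 0
  | a :: cs => (if prevW ∧ a = 'W' then 1 else 0) + pairsFrom (a == 'W') cs

/-- Final value of B's `prev_w` flag. -/
def lastW (prevW : Bool) : List Char → Bool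
  | [] => prevW
  | a :: cs => lastW (a == 'W') cs

lemma wposAux_nil (k : Int) : wposAux [] k = [] := rfl

lemma wposAux_cons (a : Char) (cs : List Char) (k : Int) :
    wposAux (a :: cs) k = if a = 'W' then k :: wposAux cs (k + 1) else wposAux cs (k + 1) := by
  simp only [wposAux, PySem.List.enumerate_cons, List.filterMap_cons]
  split_ifs with h <;> simp

/-- B's whole fold, characterised by an invariant over the generalised state. -/
lemma bfold (cs : List Char) (i adj : Int) (prevW : Bool) (rev : List Int) :
    (PySem.List.enumerate cs i).foldl
      (fun (st : Int × Bool × List Int) (p : Int × Char) =>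
        if p.2 = 'W' then
          ((if st.2.1 then st.1 + 1 else st.1), true, p.1 :: st.2.2)
        else (st.1, false, st.2.2))
      (adj, prevW, rev)
    = (adj + pairsFrom prevW cs, lastW prevW cs, (wposAux cs i).reverse ++ rev) := by
  induction cs generalizing i adj prevW rev with
  | nil => simp [wposAux_nil, pairsFrom, lastW]
  | cons a cs ih =>
    rw [PySem.List.enumerate_cons, List.foldl_cons]
    by_cases ha : a = 'W'
    · simp only [ha]
      rw [ih]
      simp only [pairsFrom, lastW, wposAux_cons, if_pos rfl]
      cases prevW <;> simp <;> ring
    · simp only [if_neg ha]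
      rw [ih]
      have hb : (a == 'W') = false := by simpa using ha
      simp [pairsFrom, lastW, wposAux_cons, ha, hb]

lemma pairsFrom_head (b : Bool) (cs : List Char) :
    pairsFrom b cs = (if b ∧ cs.head? = some 'W' then 1 else 0) + pairsCount cs := by
  induction cs generalizing b with
  | nil => simp [pairsFrom, pairsCount]
  | cons a cs ih =>
    rw [pairsFrom, pairsCount, ih]
    by_cases ha : a = 'W'
    · have hb : (a == 'W') = true := by simpa using ha
      simp only [ha]
      cases b <;> simp <;> ring
    · have hb : (a == 'W') = false := by simpa using ha
      simp only [hb, List.head?_cons, Option.some.injEq]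
      split_ifs <;> simp_all <;> ring

lemma pairsFrom_false (cs : List Char) : pairsFrom false cs = pairsCount cs := by
  rw [pairsFrom_head]; simp

/-- A's index-scan count over the text equals the structural pair count. -/
lemma scan_eq_pairsCount (cs : List Char) :
    ((List.range (cs.length - 1)).countP
      (fun n : Nat => decide (PySem.List.pyGet? cs (n : Int) = some 'W' ∧
                        PySem.List.pyGet? cs ((n : Int) + 1) = some 'W')) : Int) = pairsCount cs := by
  induction cs with
  | nil => simp [pairsCount]
  | cons a cs ih =>
    cases cs with
    | nil => simp [pairsCount]
    | cons b t =>
      have hlen : (a :: b :: t).length - 1 = (t.length + 1) := by simp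
      rw [hlen, List.range_succ_eq_map, List.countP_cons, List.countP_map]
      have hshift : ∀ n : Nat,
          ((fun n : Nat => decide (PySem.List.pyGet? (a :: b :: t) (n : Int) = some 'W' ∧
              PySem.List.pyGet? (a :: b :: t) ((n : Int) + 1) = some 'W')) ∘ Nat.succ) n
          = (fun n : Nat => decide (PySem.List.pyGet? (b :: t) (n : Int) = some 'W' ∧
              PySem.List.pyGet? (b :: t) ((n : Int) + 1) = some 'W')) n := by
        intro n
        have e1 : ((Nat.succ n : Nat) : Int) = ((n + 1 : Nat) : Int) := by push_cast; ring
        have e2 : (((n : Nat) : Int) + 1) = ((n + 1 : Nat) : Int) := by push_cast; ring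
        simp only [Function.comp, e1, e2, PySem.List.pyGet?_natCast]
        have e3 : (((n + 1 : Nat) : Int) + 1) = ((n + 2 : Nat) : Int) := by push_cast; ring
        simp only [e3, PySem.List.pyGet?_natCast]
        simp
      rw [List.countP_congr (fun x _ => by rw [hshift x])]
      rw [pairsCount, ← ih]
      have h0 : (decide (PySem.List.pyGet? (a :: b :: t) ((0 : Nat) : Int) = some 'W' ∧
          PySem.List.pyGet? (a :: b :: t) (((0 : Nat) : Int) + 1) = some 'W'))
          = decide (a = 'W' ∧ b = 'W') := by
        norm_num [PySem.List.pyGet?_natCast]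
      rw [h0]
      by_cases hab : a = 'W' ∧ b = 'W'
      · simp only [hab]
        push_cast
        simp
        ring
      · simp [hab]

/-- A's whole fold equals the structural pair count. -/
lemma fold_eq_pairsCount (text : String) :
    (PySem.List.pyRange 0 (PySem.Str.len text - 1) 1).foldl
      (fun acc i => if PySem.List.pyGet? text.toList i = some 'W' ∧
                    PySem.List.pyGet? text.toList (i + 1) = some 'W'
                    then acc + 1 else acc) (0 : Int)
    = pairsCount text.toList := by
  rw [PySem.List.foldl_ite_add_one, ← scan_eq_pairsCount text.toList]
  rw [PySem.List.pyRange_one, List.countP_map]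
  have h1 : (PySem.Str.len text - 1 - 0).toNat = text.toList.length - 1 := by
    simp [PySem.Str.len_eq]
  rw [h1]
  have hcong : (List.range (text.toList.length - 1)).countP
      ((fun i : Int => decide (PySem.List.pyGet? text.toList i = some 'W' ∧
          PySem.List.pyGet? text.toList (i + 1) = some 'W')) ∘ (fun k : Nat => 0 + (k : Int)))
      = (List.range (text.toList.length - 1)).countP
      (fun n : Nat => decide (PySem.List.pyGet? text.toList (n : Int) = some 'W' ∧
          PySem.List.pyGet? text.toList ((n : Int) + 1) = some 'W')) :=
    List.countP_congr (fun x _ => by norm_num)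
  rw [hcong]
  ring

/-- `pyGet?`-based span expression equals the `getLast?`/`head?` one, on any list. -/
lemma span_eq (ps : List Int) :
    (PySem.List.pyGet? ps (-1)).getD 0 - (PySem.List.pyGet? ps 0).getD 0
      = ps.getLast?.getD 0 - ps.head?.getD 0 := by
  rw [PySem.List.pyGet?_neg_one, PySem.List.pyGet?_zero]
  simp [List.head?_eq_getElem?]

-- ===== VERDICT (by name: the statement is the Claim_ definition above) =====
theorem w_stats_spec : Claim_equal_w_stats := by
  intro text _
  unfold Spec_w_stats
  show w_stats text = w_stats_alt text
  simp only [w_stats, w_stats_alt]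
  have hA : (PySem.List.enumerate text.toList 0).filterMap
      (fun p => if p.2 = 'W' then some p.1 else none) = wposAux text.toList 0 := rfl
  rw [hA, bfold]
  simp only [List.append_nil, List.reverse_reverse]
  by_cases h : wposAux text.toList 0 = []
  · simp [h]
  · rw [if_neg (by simpa using h), if_neg (by simpa [List.isEmpty_iff] using h)]
    rw [span_eq, fold_eq_pairsCount text, pairsFrom_false]
    simp
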